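-- pv_equiv track=rewrite | github.com/pypi-data/pypi-mirror-2 | packages/binstr/binstr-1.1.tar.gz/binstr-1.1/binstr.py | b_nxor
-- ===== SOURCE A (Python) =====
-- def b_nxor(A='00000000', B='00000000', align='right'): # {{{
--     '''
--     Perform a bitwise NXOR on two strings of binary digits, A and B.
--     The align argument can be used to align the shortest of A and B to one
--       side of the other.
--     The returned string is the same length as the longest input.
--     E.g. b_or('0101', '0011') returns '1001'
--          b_or('01010000', '0011') returns '10101100'
--          b_or('01010000', '0011', align='left') returns '10011111'
--     '''
--     assert type(A) is str, 'A is not a string: %s' % str(A)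
--     assert type(B) is str, 'B is not a string: %s' % str(B)
--     assert type(align) is str, 'align is not a string: %s' % str(align)
--
--     assert len(A) >= 1, 'A has no digits'
--     assert len(B) >= 1, 'B has no digits'
--     assert align == 'right' or align == 'left', 'Invalid align: "%s". Use either "right" or "left"' % align
--
--     from re import compile as re_compile
--     pattern = re_compile('[^01]')
--     assert bool(pattern.search(A)) == False, 'Invalid A: "%s". Must only contain "0"s or "1"s.' % A
--     assert bool(pattern.search(B)) == False, 'Invalid B: "%s". Must only contain "0"s or "1"s.' % B
--     del re_compile, pattern
--
--     if len(A) >= len(B): (p, q) = (A, B)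
--     else:                (p, q) = (B, A)
--     del A, B
--
--     if align == 'right': q = '0'*(len(p) - len(q)) + q
--     else:                q = q + '0'*(len(p) - len(q))
--     assert len(p) == len(q), 'Error in this function! len(p) must equal len(q). Oh dear.'
--
--     return ''.join([str(int( not( bool(int(a)) ^ bool(int(b)) ) )) for (a, b) in zip(p, q)])
-- ===== SOURCE B (Python) =====
-- def b_nxor(A='00000000', B='00000000', align='right'):
--     assert type(A) is str, 'A is not a string: %s' % str(A)
--     assert type(B) is str, 'B is not a string: %s' % str(B)
--     assert type(align) is str, 'align is not a string: %s' % str(align)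
--
--     assert len(A) >= 1, 'A has no digits'
--     assert len(B) >= 1, 'B has no digits'
--     assert align == 'right' or align == 'left', 'Invalid align: "%s". Use either "right" or "left"' % align
--
--     import re
--     assert bool(re.search('[^01]', A)) == False, 'Invalid A: "%s". Must only contain "0"s or "1"s.' % A
--     assert bool(re.search('[^01]', B)) == False, 'Invalid B: "%s". Must only contain "0"s or "1"s.' % B
--
--     if len(A) >= len(B): p, q = A, B
--     else:                p, q = B, A
--
--     if align == 'right': q = q.rjust(len(p), '0')
--     else:                q = q.ljust(len(p), '0')
--
--     pv = int(p, 2)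
--     qv = int(q, 2)
--     mask = (1 << len(p)) - 1
--     return format((pv ^ qv) ^ mask, '0{}b'.format(len(p)))
-- ===== Notes on version B (the rewrite author's own statement) =====
-- stated objective: alternative
-- what changed: B keeps the validation, length-ordering and zero-padding, but replaces the per-character zip/join NXOR with integer arithmetic: it parses both aligned strings as base-2 integers, XORs them, complements against a full-ones mask, and formats the result back as a zero-padded binary string.
import Mathlib
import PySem

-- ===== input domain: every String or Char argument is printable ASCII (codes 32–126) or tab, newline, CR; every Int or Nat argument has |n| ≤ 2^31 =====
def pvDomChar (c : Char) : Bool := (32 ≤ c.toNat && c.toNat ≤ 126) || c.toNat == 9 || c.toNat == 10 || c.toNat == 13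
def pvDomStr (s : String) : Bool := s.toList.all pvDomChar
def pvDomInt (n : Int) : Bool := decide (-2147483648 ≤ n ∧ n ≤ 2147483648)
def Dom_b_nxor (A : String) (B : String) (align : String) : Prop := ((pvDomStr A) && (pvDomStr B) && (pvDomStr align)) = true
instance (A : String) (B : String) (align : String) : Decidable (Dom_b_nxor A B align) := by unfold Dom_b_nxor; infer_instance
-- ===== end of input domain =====

-- B replaces A's per-character zip/join NXOR by integer arithmetic (parse base 2, XOR, mask,
-- format back zero-padded); objective: alternative algorithm, validation/ordering/padding kept.
-- On inputs violating A's assertions both Pythons raise AssertionError; those are outside Pre_.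

-- ===== PORT A =====
-- (Under Pre_ every char of p/q is '0' or '1', so int(a) is 0/1 and bool(int(a)) is (a = '1').)
def b_nxor (A : String) (B : String) (align : String) : String :=
  let pq := if A.length ≥ B.length then (A.toList, B.toList) else (B.toList, A.toList)
  let p := pq.1
  let q := if align = "right" then List.replicate (p.length - pq.2.length) '0' ++ pq.2
           else pq.2 ++ List.replicate (p.length - pq.2.length) '0'
  String.mk ((p.zip q).map (fun ab =>
    if ((ab.1 = '1') : Bool) ^^ ((ab.2 = '1') : Bool) then '0' else '1'))

-- ===== PORT B =====
-- int(s, 2) on a string of '0'/'1' digits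
def parseBin (l : List Char) : Nat :=
  l.foldl (fun acc c => 2 * acc + (if c = '1' then 1 else 0)) 0

-- binary digits of n, most significant first, accumulator style (empty for 0)
def natToBinAux : Nat → List Char → List Char
  | 0, acc => acc
  | n + 1, acc => natToBinAux ((n + 1) / 2) ((if (n + 1) % 2 = 1 then '1' else '0') :: acc)
decreasing_by omega

-- format(n, 'b') : binary representation, '0' for zero
def natToBin (n : Nat) : List Char := if n = 0 then ['0'] else natToBinAux n []

def b_nxor_alt (A : String) (B : String) (align : String) : String :=
  let pq := if A.length ≥ B.length then (A.toList, B.toList) else (B.toList, A.toList)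
  let p := pq.1
  let q := if align = "right" then List.replicate (p.length - pq.2.length) '0' ++ pq.2
           else pq.2 ++ List.replicate (p.length - pq.2.length) '0'
  let pv := parseBin p
  let qv := parseBin q
  let mask := 2 ^ p.length - 1
  let d := natToBin ((pv ^^^ qv) ^^^ mask)
  String.mk (List.replicate (p.length - d.length) '0' ++ d)

-- ===== PRECONDITION & SPEC =====
-- Pre_ excludes exactly the inputs on which A's assertions raise AssertionError:
-- an empty A or B, an align value that is neither of the two accepted words, or a
-- character in A or B that is not a binary digit.
def Pre_b_nxor (A : String) (B : String) (align : String) : Prop :=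
  A.length ≥ 1 ∧ B.length ≥ 1 ∧ (align = "right" ∨ align = "left") ∧
  (A.toList.all (fun c => c == '0' || c == '1')) = true ∧
  (B.toList.all (fun c => c == '0' || c == '1')) = true
instance (A : String) (B : String) (align : String) : Decidable (Pre_b_nxor A B align) := by
  unfold Pre_b_nxor; infer_instance

def pvWitness_b_nxor : String × String × String := ("01010000", "0011", "right")

def Spec_b_nxor (A : String) (B : String) (align : String) (out : String) : Prop := out = b_nxor_alt A B align
instance (A : String) (B : String) (align : String) (out : String) : Decidable (Spec_b_nxor A B align out) := by unfold Spec_b_nxor; infer_instance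

-- ===== CLAIM (what is proved, stated in full; the proofs are below) =====
def Claim_equal_b_nxor : Prop := ∀ (A : String) (B : String) (align : String), Dom_b_nxor A B align → Pre_b_nxor A B align → Spec_b_nxor A B align (b_nxor A B align)

-- ===== LEMMAS AND PROOFS =====

def IsBin (l : List Char) : Prop := ∀ c ∈ l, c = '0' ∨ c = '1'

theorem natToBinAux_acc (v : Nat) (acc : List Char) :
    natToBinAux v acc = natToBinAux v [] ++ acc := by
  induction v using Nat.strong_induction_on generalizing acc with
  | _ v ih =>
    match v with
    | 0 => simp [natToBinAux]
    | n + 1 =>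
      rw [natToBinAux, natToBinAux,
        ih ((n+1)/2) (by omega) ((if (n + 1) % 2 = 1 then '1' else '0') :: acc),
        ih ((n+1)/2) (by omega) [if (n + 1) % 2 = 1 then '1' else '0'],
        List.append_assoc, List.singleton_append]

theorem xor_double (x y a b : Nat) (ha : a ≤ 1) (hb : b ≤ 1) :
    (2 * x + a) ^^^ (2 * y + b) = 2 * (x ^^^ y) + (a ^^^ b) := by
  apply Nat.eq_of_testBit_eq
  intro i
  cases i with
  | zero =>
    simp only [Nat.testBit_zero]
    interval_cases a <;> interval_cases b <;> simp <;> omega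
  | succ i =>
    simp only [Nat.testBit_succ]
    have h1 : (2 * x + a) / 2 = x := by omega
    have h2 : (2 * y + b) / 2 = y := by omega
    have h3 : (2 * (x ^^^ y) + (a ^^^ b)) / 2 = x ^^^ y := by
      have : a ^^^ b ≤ 1 := by interval_cases a <;> interval_cases b <;> decide
      omega
    rw [Nat.xor_div_two, h1, h2, h3]

theorem parseBin_append (s : List Char) (c : Char) :
    parseBin (s ++ [c]) = 2 * parseBin s + (if c = '1' then 1 else 0) := by
  simp [parseBin, List.foldl_append]

theorem parseBin_lt (s : List Char) : parseBin s < 2 ^ s.length := by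
  induction s using List.reverseRecOn with
  | nil => simp [parseBin]
  | append_singleton s c ih =>
    rw [parseBin_append]
    simp only [List.length_append, List.length_singleton, pow_succ]
    split <;> omega

-- digits of (parseBin s), zero-padded back to s.length, reconstruct s
theorem bin_roundtrip (s : List Char) (hb : IsBin s) :
    List.replicate (s.length - (natToBinAux (parseBin s) []).length) '0' ++
      natToBinAux (parseBin s) [] = s := by
  induction s using List.reverseRecOn with
  | nil => simp [parseBin, natToBinAux]
  | append_singleton s c ih =>
    have hbs : IsBin s := fun x hx => hb x (by simp [hx])
    have hc : c = '0' ∨ c = '1' := hb c (by simp)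
    have ih' := ih hbs
    rw [parseBin_append]
    set v := parseBin s with hv
    set b : Nat := if c = '1' then 1 else 0 with hbdef
    have hble : b ≤ 1 := by rcases hc with h | h <;> simp [h, hbdef]
    by_cases h0 : 2 * v + b = 0
    · have hv0 : v = 0 := by omega
      have hb0 : b = 0 := by omega
      have hcc : c = '0' := by
        rcases hc with h | h
        · exact h
        · simp [h] at hbdef; omega
      have haux : natToBinAux (2 * v + b) [] = [] := by rw [h0]; simp [natToBinAux]
      have hs0 : List.replicate s.length '0' = s := by
        rw [hv0] at ih'
        simpa [natToBinAux] using ih'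
      rw [haux, hcc]
      simp only [List.append_nil, List.length_append, List.length_nil, Nat.sub_zero,
        List.length_singleton]
      conv_rhs => rw [← hs0]
      rw [← List.replicate_succ']
    · -- 2*v+b ≠ 0 : peel one digit
      have hdiv : (2 * v + b) / 2 = v := by omega
      have hmod : (2 * v + b) % 2 = b := by omega
      clear hble
      have hch : (if (2 * v + b) % 2 = 1 then '1' else '0') = c := by
        rw [hmod]
        rcases hc with h | h <;> simp [h, hbdef]
      have hstep : natToBinAux (2 * v + b) [] = natToBinAux v [] ++ [c] := by
        obtain ⟨m, hm⟩ : ∃ m, 2 * v + b = m + 1 := ⟨2 * v + b - 1, by omega⟩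
        rw [hm, natToBinAux, ← hm, hdiv, hch, natToBinAux_acc]
      rw [hstep]
      have hlen : (natToBinAux v []).length ≤ s.length := by
        have := congrArg List.length ih'
        simp at this; omega
      simp only [List.length_append, List.length_singleton]
      have : s.length + 1 - ((natToBinAux v []).length + 1) =
             s.length - (natToBinAux v []).length := by omega
      rw [this, ← List.append_assoc, ih']

theorem nxor_parse (p q : List Char) (hlen : p.length = q.length)
    (hp : IsBin p) (hq : IsBin q) :
    parseBin ((p.zip q).map (fun ab =>
        if ((ab.1 = '1') : Bool) ^^ ((ab.2 = '1') : Bool) then '0' else '1')) =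
      (parseBin p ^^^ parseBin q) ^^^ (2 ^ p.length - 1) := by
  induction p using List.reverseRecOn generalizing q with
  | nil =>
    have : q = [] := by cases q <;> simp_all
    subst this; simp [parseBin]
  | append_singleton s a ih =>
    have hq' : q ≠ [] := by intro h; subst h; simp at hlen
    obtain ⟨t, b, rfl⟩ : ∃ t b, q = t ++ [b] :=
      ⟨q.dropLast, q.getLast hq', (List.dropLast_append_getLast hq').symm⟩
    have hlen' : s.length = t.length := by simp at hlen; omega
    have hs : IsBin s := fun x hx => hp x (by simp [hx])
    have ht : IsBin t := fun x hx => hq x (by simp [hx])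
    have ha : a = '0' ∨ a = '1' := hp a (by simp)
    have hb : b = '0' ∨ b = '1' := hq b (by simp)
    have hzip : (s ++ [a]).zip (t ++ [b]) = s.zip t ++ [(a, b)] := by
      rw [List.zip_append hlen']; rfl
    rw [hzip, List.map_append, List.map_singleton, parseBin_append,
      parseBin_append, parseBin_append, ih t hlen' hs ht]
    have hps := parseBin_lt s
    have hpt := parseBin_lt t
    set ba : Nat := if a = '1' then 1 else 0 with hba
    set bb : Nat := if b = '1' then 1 else 0 with hbb
    have h1 : ba ≤ 1 := by rcases ha with h | h <;> simp [h, hba]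
    have h2 : bb ≤ 1 := by rcases hb with h | h <;> simp [h, hbb]
    rw [xor_double _ _ _ _ h1 h2]
    have hxle : ba ^^^ bb ≤ 1 := by
      interval_cases ba <;> interval_cases bb <;> decide
    have hmask : 2 ^ (s ++ [a]).length - 1 = 2 * (2 ^ s.length - 1) + 1 := by
      simp only [List.length_append, List.length_singleton, pow_succ]
      have : 1 ≤ 2 ^ s.length := Nat.one_le_two_pow
      omega
    rw [hmask, xor_double _ _ _ _ hxle (le_refl 1)]
    congr 1
    rcases ha with h | h <;> rcases hb with h' | h' <;> simp [h, h', hba, hbb]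

theorem replicate_isBin (n : Nat) : IsBin (List.replicate n '0') := by
  intro c hc
  simp [List.eq_of_mem_replicate hc]

theorem isBin_append {l₁ l₂ : List Char} (h₁ : IsBin l₁) (h₂ : IsBin l₂) :
    IsBin (l₁ ++ l₂) := by
  intro c hc
  rcases List.mem_append.mp hc with h | h
  · exact h₁ c h
  · exact h₂ c h

-- the common core: for equal-length nonempty binary p q, the per-bit NXOR string
-- equals the integer computation's formatted result
theorem core (p q : List Char) (hlen : p.length = q.length) (hne : p ≠ [])
    (hp : IsBin p) (hq : IsBin q) :
    (p.zip q).map (fun ab =>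
        if ((ab.1 = '1') : Bool) ^^ ((ab.2 = '1') : Bool) then '0' else '1') =
      List.replicate (p.length - (natToBin ((parseBin p ^^^ parseBin q) ^^^ (2 ^ p.length - 1))).length) '0' ++
        natToBin ((parseBin p ^^^ parseBin q) ^^^ (2 ^ p.length - 1)) := by
  set r := (p.zip q).map (fun ab =>
      if ((ab.1 = '1') : Bool) ^^ ((ab.2 = '1') : Bool) then '0' else '1') with hr
  have hrbin : IsBin r := by
    intro c hc
    rw [hr] at hc
    simp only [List.mem_map] at hc
    obtain ⟨ab, _, rfl⟩ := hc
    split <;> simp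
  have hrlen : r.length = p.length := by
    rw [hr]; simp [List.length_zip, hlen]
  have hW : (parseBin p ^^^ parseBin q) ^^^ (2 ^ p.length - 1) = parseBin r :=
    (nxor_parse p q hlen hp hq).symm
  rw [hW]
  have hrt := bin_roundtrip r hrbin
  rw [hrlen] at hrt
  by_cases h0 : parseBin r = 0
  · have haux : natToBinAux (parseBin r) [] = [] := by rw [h0]; simp [natToBinAux]
    rw [haux] at hrt
    simp only [List.append_nil] at hrt
    have hn1 : 1 ≤ p.length := by
      cases p with
      | nil => exact absurd rfl hne
      | cons _ _ => simp
    rw [natToBin, if_pos h0]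
    obtain ⟨m, hm⟩ : ∃ m, p.length = m + 1 := ⟨p.length - 1, by omega⟩
    rw [← hrt, hm]
    simp [List.replicate_succ']
  · rw [natToBin, if_neg h0]
    exact hrt.symm

theorem pad_len (p q0 : List Char) (h : q0.length ≤ p.length) :
    p.length = (List.replicate (p.length - q0.length) '0' ++ q0).length ∧
    p.length = (q0 ++ List.replicate (p.length - q0.length) '0').length := by
  simp only [List.length_append, List.length_replicate]
  omega

-- ===== VERDICT (by name: the statement is the Claim_ definition above) =====
theorem b_nxor_spec : Claim_equal_b_nxor := by
  intro A B align _hdom hpre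
  obtain ⟨hA, hB, halign, hAb0, hBb0⟩ := hpre
  have hAb : IsBin A.toList := by
    intro c hc
    have := List.all_eq_true.mp hAb0 c hc
    simp only [Bool.or_eq_true, beq_iff_eq] at this
    exact this
  have hBb : IsBin B.toList := by
    intro c hc
    have := List.all_eq_true.mp hBb0 c hc
    simp only [Bool.or_eq_true, beq_iff_eq] at this
    exact this
  have hAlen : A.length = A.toList.length := String.length_toList.symm
  have hBlen : B.length = B.toList.length := String.length_toList.symm
  have hAne : A.toList ≠ [] := by
    intro h; rw [h] at hAlen; simp only [List.length_nil] at hAlen; omega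
  have hBne : B.toList ≠ [] := by
    intro h; rw [h] at hBlen; simp only [List.length_nil] at hBlen; omega
  have hnl : ¬ (("left" : String) = "right") := by decide
  unfold Spec_b_nxor b_nxor b_nxor_alt
  by_cases hord : A.length ≥ B.length
  · rw [hAlen, hBlen] at hord
    rw [if_pos (by rwa [hAlen, hBlen])]
    dsimp only
    rcases halign with rfl | rfl
    · rw [if_pos rfl]
      exact congrArg String.mk (core _ _ (pad_len _ _ hord).1 hAne hAb
        (isBin_append (replicate_isBin _) hBb))
    · rw [if_neg hnl]
      exact congrArg String.mk (core _ _ (pad_len _ _ hord).2 hAne hAb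
        (isBin_append hBb (replicate_isBin _)))
  · have hord' : A.toList.length ≤ B.toList.length := by
      rw [← hAlen, ← hBlen]; omega
    rw [if_neg hord]
    dsimp only
    rcases halign with rfl | rfl
    · rw [if_pos rfl]
      exact congrArg String.mk (core _ _ (pad_len _ _ hord').1 hBne hBb
        (isBin_append (replicate_isBin _) hAb))
    · rw [if_neg hnl]
      exact congrArg String.mk (core _ _ (pad_len _ _ hord').2 hBne hBb
        (isBin_append hAb (replicate_isBin _)))
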